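-- pv_equiv track=rewrite | github.com/sarikiras/matrice-word-searches | diagonale.py | grid_inf
-- ===== SOURCE A (Python) =====
-- def grid_inf(grid, n):                      # good!
--     liste = []
--     for k in range(1, n):
--         ligne = []
--         for j in range(n-k):
--             ligne.append(grid[j+k][j])
--         liste.append(ligne)
--     return liste
-- ===== SOURCE B (Python) =====
-- def grid_inf(grid, n):
--     # One row-major pass bucketing each cell grid[i][j] (j < i) into diagonal i-j-1.
--     liste = [[] for _ in range(1, n)]
--     for i in range(1, n):
--         row = grid[i]
--         for j in range(i):
--             liste[i - j - 1].append(row[j])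
--     return liste
-- ===== Notes on version B (the rewrite author's own statement) =====
-- stated objective: alternative
-- what changed: B replaces A's per-diagonal walk (one inner loop per diagonal k reading grid[j+k][j]) by a single row-major pass that buckets each cell grid[i][j] (j < i) into a pre-created list for diagonal i-j-1.
import Mathlib
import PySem

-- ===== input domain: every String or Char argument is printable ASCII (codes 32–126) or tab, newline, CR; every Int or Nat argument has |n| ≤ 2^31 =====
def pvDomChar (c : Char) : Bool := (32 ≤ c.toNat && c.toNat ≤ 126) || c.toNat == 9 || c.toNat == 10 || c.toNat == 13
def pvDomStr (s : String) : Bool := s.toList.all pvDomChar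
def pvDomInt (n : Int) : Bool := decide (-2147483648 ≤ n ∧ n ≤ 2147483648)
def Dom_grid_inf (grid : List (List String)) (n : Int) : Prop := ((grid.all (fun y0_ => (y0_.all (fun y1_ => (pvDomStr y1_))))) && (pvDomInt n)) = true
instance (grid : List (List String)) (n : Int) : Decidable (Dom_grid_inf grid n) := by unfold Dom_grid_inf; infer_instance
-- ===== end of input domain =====

-- B replaces A's per-diagonal walk by a single row-major pass that buckets each cell
-- grid[i][j] (j < i) into diagonal bucket i-j-1 (objective: alternative decomposition, same cost).

-- ===== PORT A =====
def grid_inf (grid : List (List String)) (n : Int) : List (List String) :=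
  (PySem.List.pyRange 1 n 1).foldl (fun liste k =>
    let ligne := (PySem.List.pyRange 0 (n - k) 1).foldl (fun ligne j =>
      ligne ++ [PySem.List.pyGetD (PySem.List.pyGetD grid (j + k) []) j ""]) ([] : List String)
    liste ++ [ligne]) []

-- ===== PORT B =====
def grid_inf_alt (grid : List (List String)) (n : Int) : List (List String) :=
  let init : List (List String) := (PySem.List.pyRange 1 n 1).map (fun _ => [])
  (PySem.List.pyRange 1 n 1).foldl (fun liste i =>
    let row := PySem.List.pyGetD grid i []
    (PySem.List.pyRange 0 i 1).foldl (fun liste j =>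
      PySem.List.pySetD liste (i - j - 1)
        (PySem.List.pyGetD liste (i - j - 1) [] ++ [PySem.List.pyGetD row j ""])) liste) init

-- ===== PRECONDITION & SPEC =====
-- Pre_ excludes exactly the inputs where Python A raises IndexError: every row index
-- 1..n-1 must exist in grid and row i must have at least i columns.
def Pre_grid_inf (grid : List (List String)) (n : Int) : Prop :=
  (n ≤ 1 ∨ n ≤ (grid.length : Int)) ∧
  ∀ i ∈ List.range grid.length, 1 ≤ i → (i : Int) < n → i ≤ (grid.getD i []).length
instance (grid : List (List String)) (n : Int) : Decidable (Pre_grid_inf grid n) := by unfold Pre_grid_inf; infer_instance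
def pvWitness_grid_inf : List (List String) × Int := ([["a"], ["b", "c"]], 2)

def Spec_grid_inf (grid : List (List String)) (n : Int) (out : List (List String)) : Prop := out = grid_inf_alt grid n
instance (grid : List (List String)) (n : Int) (out : List (List String)) : Decidable (Spec_grid_inf grid n out) := by unfold Spec_grid_inf; infer_instance

-- ===== CLAIM (what is proved, stated in full; the proofs are below) =====
def Claim_equal_grid_inf : Prop := ∀ (grid : List (List String)) (n : Int), Dom_grid_inf grid n → Pre_grid_inf grid n → Spec_grid_inf grid n (grid_inf grid n)

-- ===== LEMMAS AND PROOFS =====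

-- canonical cell and the buckets-after-t-rows state
def pvCell (grid : List (List String)) (r j : Nat) : String := (grid.getD r []).getD j ""

def pvState (grid : List (List String)) (m t : Nat) : List (List String) :=
  (List.range m).map (fun b => (List.range (t - b)).map (fun j => pvCell grid (b + 1 + j) j))

def pvMid (grid : List (List String)) (m t s : Nat) : List (List String) :=
  (List.range m).map (fun b =>
    (List.range (if t < b + s then t + 1 - b else t - b)).map (fun j => pvCell grid (b + 1 + j) j))

theorem grid_inf_eq_state (grid : List (List String)) (n : Int) :
    grid_inf grid n = pvState grid (n - 1).toNat (n - 1).toNat := by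
  unfold grid_inf pvState
  rw [PySem.List.pyRange_one 1 n,
    List.foldl_map, PySem.List.foldl_append_singleton_eq_map]
  apply List.map_congr_left
  intro b hb
  rw [List.mem_range] at hb
  rw [PySem.List.pyRange_one 0 (n - (1 + (b : Int))),
    List.foldl_map, PySem.List.foldl_append_singleton_eq_map]
  have h1 : (n - (1 + (b : Int)) - 0).toNat = (n - 1).toNat - b := by omega
  rw [h1]
  apply List.map_congr_left
  intro j hj
  simp [pvCell]
  rw [show (j : Int) + (1 + (b : Int)) = ((b + 1 + j : Nat) : Int) from by push_cast; ring]
  simp only [PySem.List.pyGetD_natCast]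
  rfl

theorem pvMid_zero (grid : List (List String)) (m t : Nat) :
    pvMid grid m t 0 = pvState grid m t := by
  unfold pvMid pvState
  apply List.map_congr_left
  intro b _
  have h : (if t < b + 0 then t + 1 - b else t - b) = t - b := by split_ifs <;> omega
  rw [h]

theorem pvMid_full (grid : List (List String)) (m t : Nat) :
    pvMid grid m t (t + 1) = pvState grid m (t + 1) := by
  unfold pvMid pvState
  apply List.map_congr_left
  intro b _
  have h : (if t < b + (t + 1) then t + 1 - b else t - b) = t + 1 - b := by split_ifs <;> omega
  rw [h]

theorem pvMid_step (grid : List (List String)) (m t s : Nat) (hs : s ≤ t) :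
    PySem.List.pySetD (pvMid grid m t s) (((t : Int) + 1) - (s : Int) - 1)
      (PySem.List.pyGetD (pvMid grid m t s) (((t : Int) + 1) - (s : Int) - 1) []
        ++ [PySem.List.pyGetD (PySem.List.pyGetD grid ((t : Int) + 1) []) (s : Int) ""]) =
    pvMid grid m t (s + 1) := by
  have hidx : ((t : Int) + 1) - (s : Int) - 1 = ((t - s : Nat) : Int) := by omega
  have hrow : (t : Int) + 1 = ((t + 1 : Nat) : Int) := by push_cast; ring
  rw [hidx, hrow]
  simp only [PySem.List.pySetD_natCast, PySem.List.pyGetD_natCast]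
  apply List.ext_getElem
  · simp [pvMid]
  intro b hb1 hb2
  simp only [pvMid, List.length_map, List.length_range, List.length_set] at hb1 hb2
  rw [List.getElem_set]
  by_cases hbe : t - s = b
  · subst hbe
    have hcount : (if t < (t - s) + s then t + 1 - (t - s) else t - (t - s)) = s := by
      split_ifs <;> omega
    have hcount' : (if t < (t - s) + (s + 1) then t + 1 - (t - s) else t - (t - s)) = s + 1 := by
      split_ifs <;> omega
    simp only [pvMid, List.getElem_map, List.getElem_range, hcount, hcount']
    rw [List.getD_eq_getElem _ _ (by simp; omega)]
    simp only [List.getElem_map, List.getElem_range, hcount]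
    rw [List.range_succ, List.map_append]
    simp [pvCell, show t - s + 1 + s = t + 1 from by omega]
  · have hcond : (if t < b + s then t + 1 - b else t - b)
        = (if t < b + (s + 1) then t + 1 - b else t - b) := by
      split_ifs <;> omega
    simp only [pvMid, List.getElem_map, List.getElem_range, if_neg hbe, hcond]

theorem pvInner (grid : List (List String)) (m t : Nat) :
    ∀ (s : Nat), s ≤ t + 1 →
    (PySem.List.pyRange 0 (s : Int) 1).foldl (fun liste j =>
      PySem.List.pySetD liste (((t : Int) + 1) - j - 1)
        (PySem.List.pyGetD liste (((t : Int) + 1) - j - 1) []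
          ++ [PySem.List.pyGetD (PySem.List.pyGetD grid ((t : Int) + 1) []) j ""]))
      (pvMid grid m t 0) = pvMid grid m t s := by
  intro s
  induction s with
  | zero => intro _; rw [PySem.List.pyRange_one_eq_nil (by omega)]; rfl
  | succ u ih =>
    intro hu
    have hcast : ((u + 1 : Nat) : Int) = (u : Int) + 1 := by push_cast; ring
    rw [hcast, PySem.List.pyRange_one_succ_right (by omega), List.foldl_append, ih (by omega)]
    simp only [List.foldl_cons, List.foldl_nil]
    exact pvMid_step grid m t u (by omega)

theorem pvOuter (grid : List (List String)) (m : Nat) :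
    ∀ (u : Nat), u ≤ m →
    (PySem.List.pyRange 1 ((u : Int) + 1) 1).foldl (fun liste i =>
      (PySem.List.pyRange 0 i 1).foldl (fun liste j =>
        PySem.List.pySetD liste (i - j - 1)
          (PySem.List.pyGetD liste (i - j - 1) []
            ++ [PySem.List.pyGetD (PySem.List.pyGetD grid i []) j ""])) liste)
      (pvState grid m 0) = pvState grid m u := by
  intro u
  induction u with
  | zero => intro _; rw [PySem.List.pyRange_one_eq_nil (by omega)]; rfl
  | succ t ih =>
    intro hu
    have hcast : ((t + 1 : Nat) : Int) + 1 = ((t : Int) + 1) + 1 := by push_cast; ring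
    rw [hcast, PySem.List.pyRange_one_succ_right (by omega), List.foldl_append, ih (by omega)]
    simp only [List.foldl_cons, List.foldl_nil]
    have h := pvInner grid m t (t + 1) (le_refl _)
    rw [pvMid_zero] at h
    have hc2 : ((t + 1 : Nat) : Int) = (t : Int) + 1 := by push_cast; ring
    rw [hc2] at h
    rw [h]
    exact pvMid_full grid m t

theorem pvState_zero_eq_init (grid : List (List String)) (n : Int) :
    ((PySem.List.pyRange 1 n 1).map (fun _ => ([] : List String)))
      = pvState grid (n - 1).toNat 0 := by
  apply List.ext_getElem
  · simp [pvState, PySem.List.length_pyRange_one]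
  intro b hb1 hb2
  simp [pvState]

theorem grid_inf_alt_eq_state (grid : List (List String)) (n : Int) :
    grid_inf_alt grid n = pvState grid (n - 1).toNat (n - 1).toNat := by
  unfold grid_inf_alt
  rw [pvState_zero_eq_init grid n]
  by_cases hn : 1 ≤ n
  · have hne : n = (((n - 1).toNat : Nat) : Int) + 1 := by omega
    rw [show PySem.List.pyRange 1 n 1 = PySem.List.pyRange 1 ((((n - 1).toNat : Nat) : Int) + 1) 1 from by rw [← hne]]
    exact pvOuter grid (n - 1).toNat (n - 1).toNat (le_refl _)
  · rw [PySem.List.pyRange_one_eq_nil (by omega)]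
    have hm : (n - 1).toNat = 0 := by omega
    simp [pvState, hm]

-- ===== VERDICT (by name: the statement is the Claim_ definition above) =====
theorem grid_inf_spec : Claim_equal_grid_inf := by
  intro grid n _ _
  unfold Spec_grid_inf
  rw [grid_inf_eq_state, grid_inf_alt_eq_state]
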